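-- pv_equiv track=rewrite | github.com/SLP25/aeonius | test_files/aeonius_compiled.py | converteMSet
-- ===== SOURCE A (Python) =====
-- def plus(a, b):
--     return a + b
--
-- def minus(a, b):
--     return a - b
--
-- def replicate(var_30):
--
--     match var_30:
--         case 0:
--             def return_replicate(var_31):
--                 match var_31:
--                     case _:
--
--                         return_return_replicate = []
--                         return return_return_replicate
--                 return return_return_replicate
--         case var_15:
--             def return_replicate(var_32):
--                 match var_32:
--                     case var_33:
--
--                         return_return_replicate = plus([var_33], (((replicate ((minus(var_15, 1)))) (var_33))))
--                         return return_return_replicate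
--                 return return_return_replicate
--     return return_replicate
--
-- def converteMSet(var_86):
--
--     match var_86:
--         case []:
--
--             return_converteMSet = []
--             return return_converteMSet
--         case [(var_33,var_1),*var_11]:
--
--             return_converteMSet = plus((((replicate (var_1)) (var_33))), ((converteMSet (var_11))))
--             return return_converteMSet
--     return return_converteMSet
-- ===== SOURCE B (Python) =====
-- def converteMSet(var_86):
--     result = []
--     for elem, count in var_86:
--         result += [elem] * count
--     return result
-- ===== Notes on version B (the rewrite author's own statement) =====
-- stated objective: faster
-- what changed: Replaces the doubly-recursive construction (curried recursive replicate per pair plus recursion over the list) with a single iterative loop extending an accumulator with [elem]*count.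
import Mathlib
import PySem

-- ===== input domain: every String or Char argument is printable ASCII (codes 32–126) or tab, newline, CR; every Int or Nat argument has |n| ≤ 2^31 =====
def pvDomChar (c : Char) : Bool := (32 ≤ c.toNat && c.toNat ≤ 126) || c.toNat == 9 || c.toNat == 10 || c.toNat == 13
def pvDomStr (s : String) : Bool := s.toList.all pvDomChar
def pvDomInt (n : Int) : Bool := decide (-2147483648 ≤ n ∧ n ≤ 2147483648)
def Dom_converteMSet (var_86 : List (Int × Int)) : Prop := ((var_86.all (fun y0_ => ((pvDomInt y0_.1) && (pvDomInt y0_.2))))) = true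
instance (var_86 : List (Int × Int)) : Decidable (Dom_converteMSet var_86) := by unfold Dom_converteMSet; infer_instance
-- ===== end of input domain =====

-- ===== PORT A =====
-- B changes A's doubly-recursive construction into one accumulator loop (faster constant factor).
-- A's replicate: curried recursion on the count; A diverges (RecursionError) for negative counts,
-- which Pre_ excludes — there the port's `c < 0` guard returns [] (never reached inside Pre_).
def convReplicate (n : Int) (x : Int) : List Int :=
  if n = 0 then []
  else if n < 0 then []  -- A diverges here; outside Pre_
  else [x] ++ convReplicate (n - 1) x
termination_by n.toNat
decreasing_by omega

def converteMSet (var_86 : List (Int × Int)) : List Int :=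
  match var_86 with
  | [] => []
  | (x, c) :: rest => convReplicate c x ++ converteMSet rest

-- ===== PORT B =====
def converteMSet_alt (var_86 : List (Int × Int)) : List Int :=
  var_86.foldl (fun result p => result ++ List.replicate p.2.toNat p.1) []

-- ===== PRECONDITION & SPEC =====
-- Pre_ excludes inputs containing a negative count, on which A's replicate recurses forever (RecursionError).
def Pre_converteMSet (var_86 : List (Int × Int)) : Prop :=
  ∀ p ∈ var_86, 0 ≤ p.2
instance (var_86 : List (Int × Int)) : Decidable (Pre_converteMSet var_86) := by unfold Pre_converteMSet; infer_instance
def pvWitness_converteMSet : (List (Int × Int)) := [(1, 3), (2, 0), (5, 2)]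

def Spec_converteMSet (var_86 : List (Int × Int)) (out : List Int) : Prop := out = converteMSet_alt var_86
instance (var_86 : List (Int × Int)) (out : List Int) : Decidable (Spec_converteMSet var_86 out) := by unfold Spec_converteMSet; infer_instance

-- ===== CLAIM =====
def Claim_equal_converteMSet : Prop := ∀ (var_86 : List (Int × Int)), Dom_converteMSet var_86 → Pre_converteMSet var_86 → Spec_converteMSet var_86 (converteMSet var_86)

-- ===== LEMMAS AND PROOFS =====
lemma convReplicate_eq (n : Int) (x : Int) (h : 0 ≤ n) :
    convReplicate n x = List.replicate n.toNat x := by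
  by_cases h0 : n = 0
  · simp [convReplicate, h0]
  · rw [convReplicate]
    have hpos : 0 < n := lt_of_le_of_ne h (Ne.symm h0)
    rw [if_neg h0, if_neg (by omega : ¬ n < 0)]
    rw [convReplicate_eq (n - 1) x (by omega)]
    have hn : n.toNat = (n - 1).toNat + 1 := by omega
    rw [hn, List.replicate_succ]
    rfl
termination_by n.toNat
decreasing_by omega

lemma foldl_acc (l : List (Int × Int)) (acc : List Int) (h : ∀ p ∈ l, 0 ≤ p.2) :
    l.foldl (fun result p => result ++ List.replicate p.2.toNat p.1) acc
      = acc ++ converteMSet l := by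
  induction l generalizing acc with
  | nil => simp [converteMSet]
  | cons hd tl ih =>
    obtain ⟨x, c⟩ := hd
    simp only [List.foldl_cons, converteMSet]
    rw [ih _ (fun p hp => h p (List.mem_cons_of_mem _ hp))]
    rw [convReplicate_eq c x (h (x, c) List.mem_cons_self)]
    simp

-- ===== VERDICT =====
theorem converteMSet_spec : Claim_equal_converteMSet := by
  intro l _ hpre
  unfold Spec_converteMSet converteMSet_alt
  rw [foldl_acc l [] hpre]
  simp
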